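-- pv_equiv track=rewrite | github.com/runtarahq/runtara | scripts/measure_memory.py | collect_tree
-- ===== SOURCE A (Python) =====
-- from typing import Any, Iterable
--
-- def collect_tree(root_pids: Iterable[int], table: dict[int, tuple[int, int, int]]) -> tuple[int, int, list[int]]:
--     children: dict[int, list[int]] = {}
--     for pid, (ppid, _rss, _vsz) in table.items():
--         children.setdefault(ppid, []).append(pid)
--
--     seen: set[int] = set()
--     stack = [pid for pid in root_pids if pid > 0]
--     while stack:
--         pid = stack.pop()
--         if pid in seen:
--             continue
--         if pid not in table:
--             continue
--         seen.add(pid)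
--         stack.extend(children.get(pid, []))
--
--     rss_kb = sum(table[pid][1] for pid in seen)
--     vsz_kb = sum(table[pid][2] for pid in seen)
--     return rss_kb, vsz_kb, sorted(seen)
-- ===== SOURCE B (Python) =====
-- def collect_tree(root_pids, table):
--     # Fixpoint iteration: grow `seen` by one table scan per round until stable
--     # (each non-final round adds at least one pid, so len(table) rounds suffice).
--     roots = {p for p in root_pids if p > 0}
--     seen = set()
--     for _ in range(len(table)):
--         new = {pid for pid, (ppid, _rss, _vsz) in table.items() if pid in roots or ppid in seen}
--         if new == seen:
--             break
--         seen = new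
--     rss_kb = sum(table[pid][1] for pid in seen)
--     vsz_kb = sum(table[pid][2] for pid in seen)
--     return rss_kb, vsz_kb, sorted(seen)
-- ===== Notes on version B (the rewrite author's own statement) =====
-- stated objective: alternative
-- what changed: Replaces A's explicit DFS stack (pop/push of children via an adjacency map) by a fixpoint iteration: repeatedly rescan the table, keeping every pid whose key is a root or whose parent is already kept, until the seen set stops changing (at most len(table) rounds); sums and sorted output as before.
import Mathlib
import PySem

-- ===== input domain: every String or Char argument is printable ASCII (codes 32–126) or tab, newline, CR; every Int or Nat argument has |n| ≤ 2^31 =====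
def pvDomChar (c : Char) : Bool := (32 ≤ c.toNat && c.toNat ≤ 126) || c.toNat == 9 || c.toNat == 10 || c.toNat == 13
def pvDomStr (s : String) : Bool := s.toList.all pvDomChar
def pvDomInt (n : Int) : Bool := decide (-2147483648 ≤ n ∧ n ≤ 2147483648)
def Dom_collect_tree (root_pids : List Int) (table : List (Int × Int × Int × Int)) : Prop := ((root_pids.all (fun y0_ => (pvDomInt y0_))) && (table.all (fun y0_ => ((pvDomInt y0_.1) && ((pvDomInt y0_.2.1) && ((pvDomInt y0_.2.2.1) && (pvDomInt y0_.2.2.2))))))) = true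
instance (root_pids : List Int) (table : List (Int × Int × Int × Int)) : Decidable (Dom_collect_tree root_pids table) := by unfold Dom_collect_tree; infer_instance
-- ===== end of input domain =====

-- B replaces A's explicit DFS stack by a whole-table fixpoint iteration of the reachability
-- predicate (objective: alternative decomposition; not claimed faster).

-- ===== PORT A =====

-- children.setdefault(ppid, []).append(pid) over table.items()
def pvChildren (table : List (Int × Int × Int × Int)) : PySem.Dict Int (List Int) :=
  table.foldl (fun d e => d.insert e.2.1 (d.getD e.2.1 [] ++ [e.1])) (PySem.Dict.mk [])

-- termination helper for the while-stack loop: marking an unseen table key shrinks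
-- the count of table keys not yet in `seen`
theorem pv_filter_add_lt (l s : List Int) (x : Int) (hx : x ∈ l) (hs : s.contains x = false) :
    (l.filter (fun k => !(PySem.Set.add s x).contains k)).length
      < (l.filter (fun k => !s.contains k)).length := by
  have hxs : x ∉ s := by simpa using hs
  have hadd : PySem.Set.add s x = s ++ [x] := by simp [PySem.Set.add, hxs]
  rw [hadd]
  have hmono : ∀ k : Int, (!(s ++ [x]).contains k) = true → (!s.contains k) = true := by
    intro k hk
    simp only [Bool.not_eq_true'] at hk ⊢
    simp only [List.contains_eq_mem, decide_eq_false_iff_not, List.mem_append,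
      List.mem_singleton] at hk ⊢
    exact fun hm => hk (Or.inl hm)
  have hsub := List.monotone_filter_right l hmono
  refine Nat.lt_of_le_of_ne hsub.length_le fun heq => ?_
  have heql := hsub.eq_of_length heq
  have hxmem : x ∈ l.filter (fun k => !s.contains k) := by
    simp only [List.mem_filter, Bool.not_eq_true']
    exact ⟨hx, hs⟩
  rw [← heql] at hxmem
  have h2 := (List.mem_filter.mp hxmem).2
  simp at h2

-- the while-stack loop of A (stack.pop() pops from the end)
def pvLoopA (t : PySem.Dict Int (Int × Int × Int)) (children : PySem.Dict Int (List Int))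
    (stack : List Int) (seen : List Int) : List Int :=
  if h : stack = [] then seen
  else if seen.contains (stack.getLast h) then
    pvLoopA t children stack.dropLast seen
  else if ht : t.contains (stack.getLast h) = false then
    pvLoopA t children stack.dropLast seen
  else
    pvLoopA t children (stack.dropLast ++ children.getD (stack.getLast h) [])
      (PySem.Set.add seen (stack.getLast h))
termination_by ((t.keys.filter (fun k => !seen.contains k)).length, stack.length)
decreasing_by
  · apply Prod.Lex.right
    have : 0 < stack.length := List.length_pos_iff.mpr h
    simp [List.length_dropLast]; omega
  · apply Prod.Lex.right
    have : 0 < stack.length := List.length_pos_iff.mpr h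
    simp [List.length_dropLast]; omega
  · apply Prod.Lex.left
    apply pv_filter_add_lt
    · have hc : t.contains (stack.getLast h) = true := by simpa using ht
      rcases t with ⟨items⟩
      simp only [PySem.Dict.contains_mk, List.any_eq_true] at hc
      obtain ⟨p, hp, hbe⟩ := hc
      simp only [PySem.Dict.keys, List.mem_map]
      exact ⟨p, hp, by simpa using hbe⟩
    · simpa using ‹¬ seen.contains (stack.getLast h) = true›

def collect_tree (root_pids : List Int) (table : List (Int × Int × Int × Int)) : Int × Int × List Int :=
  let t : PySem.Dict Int (Int × Int × Int) := PySem.Dict.mk table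
  let seen := pvLoopA t (pvChildren table) (root_pids.filter (fun p => decide (0 < p))) []
  ((seen.map (fun p => (t.getD p (0, 0, 0)).2.1)).sum,
   (seen.map (fun p => (t.getD p (0, 0, 0)).2.2)).sum,
   PySem.List.sorted seen (fun x => x) false)

-- ===== PORT B =====

-- one table scan: {pid for pid, (ppid, _, _) in table.items() if pid in roots or ppid in seen}
def pvStepB (roots : List Int) (table : List (Int × Int × Int × Int)) (seen : List Int) : List Int :=
  table.foldl (fun s e => if roots.contains e.1 || seen.contains e.2.1 then PySem.Set.add s e.1 else s) []

-- for _ in range(n): new = step(seen); if new == seen: break; seen = new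
def pvIterB (roots : List Int) (table : List (Int × Int × Int × Int)) : Nat → List Int → List Int
  | 0, seen => seen
  | n + 1, seen =>
    if pvStepB roots table seen = seen then seen
    else pvIterB roots table n (pvStepB roots table seen)

def collect_tree_alt (root_pids : List Int) (table : List (Int × Int × Int × Int)) : Int × Int × List Int :=
  let t : PySem.Dict Int (Int × Int × Int) := PySem.Dict.mk table
  let roots := PySem.Set.ofList (root_pids.filter (fun p => decide (0 < p)))
  let seen := pvIterB roots table table.length []
  ((seen.map (fun p => (t.getD p (0, 0, 0)).2.1)).sum,
   (seen.map (fun p => (t.getD p (0, 0, 0)).2.2)).sum,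
   PySem.List.sorted seen (fun x => x) false)

-- ===== PRECONDITION & SPEC =====
-- Pre_ excludes association lists with duplicate pid keys: those represent no Python dict
-- (dict keys are unique), so A never receives them.
def Pre_collect_tree (root_pids : List Int) (table : List (Int × Int × Int × Int)) : Prop :=
  (table.map (fun e => e.1)).Nodup
instance (root_pids : List Int) (table : List (Int × Int × Int × Int)) : Decidable (Pre_collect_tree root_pids table) := by unfold Pre_collect_tree; infer_instance

def pvWitness_collect_tree : List Int × (List (Int × Int × Int × Int)) :=
  ([1], [(1, 0, 2, 3), (4, 1, 5, 6)])

def Spec_collect_tree (root_pids : List Int) (table : List (Int × Int × Int × Int)) (out : Int × Int × List Int) : Prop := out = collect_tree_alt root_pids table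
instance (root_pids : List Int) (table : List (Int × Int × Int × Int)) (out : Int × Int × List Int) : Decidable (Spec_collect_tree root_pids table out) := by unfold Spec_collect_tree; infer_instance

-- ===== CLAIM (what is proved, stated in full; the proofs are below) =====
def Claim_equal_collect_tree : Prop := ∀ (root_pids : List Int) (table : List (Int × Int × Int × Int)), Dom_collect_tree root_pids table → Pre_collect_tree root_pids table → Spec_collect_tree root_pids table (collect_tree root_pids table)

-- ===== LEMMAS AND PROOFS =====

-- key list of the table
def pvKeys (table : List (Int × Int × Int × Int)) : List Int := table.map (fun e => e.1)

-- c is a child of p in the table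
def pvEdge (table : List (Int × Int × Int × Int)) (c p : Int) : Prop :=
  ∃ r v, (c, p, r, v) ∈ table

-- pids reachable from the (filtered) roots through table entries
inductive pvReach (roots : List Int) (table : List (Int × Int × Int × Int)) : Int → Prop
  | root {p : Int} : p ∈ roots → p ∈ pvKeys table → pvReach roots table p
  | child {p c : Int} : pvReach roots table p → pvEdge table c p → pvReach roots table c

-- minimality of pvReach: any root-containing, edge-closed set contains it
theorem pvReach_min (roots table : _) (S : Int → Prop)
    (hroot : ∀ r ∈ roots, r ∈ pvKeys table → S r)
    (hclosed : ∀ p, S p → ∀ c, pvEdge table c p → S c) :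
    ∀ x, pvReach roots table x → S x := by
  intro x hx
  induction hx with
  | root hr hk => exact hroot _ hr hk
  | child _ he ih => exact hclosed _ ih _ he

-- membership in the children-map fold of A (generalised over the accumulator dict)
theorem pvChildren_fold_mem :
    ∀ (l : List (Int × Int × Int × Int)) (d : PySem.Dict Int (List Int)) (x p : Int),
      x ∈ (List.foldl (fun d e => d.insert e.2.1 (d.getD e.2.1 [] ++ [e.1])) d l).getD p []
        ↔ x ∈ d.getD p [] ∨ ∃ r v, (x, p, r, v) ∈ l := by
  intro l
  induction l with
  | nil => intro d x p; simp
  | cons e t ih =>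
    intro d x p
    obtain ⟨a, b, r0, v0⟩ := e
    simp only [List.foldl_cons]
    rw [ih, PySem.Dict.getD_insert]
    simp only [List.mem_cons, Prod.mk.injEq]
    by_cases hp : p = b
    · subst hp
      simp only [if_pos trivial, eq_self_iff_true, if_true, List.mem_append, List.mem_singleton]
      constructor
      · rintro ((h | h) | ⟨r, v, h⟩)
        · exact Or.inl h
        · exact Or.inr ⟨r0, v0, Or.inl (by simp [h])⟩
        · exact Or.inr ⟨r, v, Or.inr h⟩
      · rintro (h | ⟨r, v, ⟨h1, _, _, _⟩ | h⟩)
        · exact Or.inl (Or.inl h)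
        · exact Or.inl (Or.inr h1)
        · exact Or.inr ⟨r, v, h⟩
    · rw [if_neg hp]
      constructor
      · rintro (h | ⟨r, v, h⟩)
        · exact Or.inl h
        · exact Or.inr ⟨r, v, Or.inr h⟩
      · rintro (h | ⟨r, v, ⟨_, h2, _, _⟩ | h⟩)
        · exact Or.inl h
        · exact absurd h2 hp
        · exact Or.inr ⟨r, v, h⟩

-- membership in the children map built by A
theorem pvChildren_mem (table : List (Int × Int × Int × Int)) (x p : Int) :
    x ∈ (pvChildren table).getD p [] ↔ pvEdge table x p := by
  unfold pvChildren pvEdge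
  rw [pvChildren_fold_mem]
  simp [PySem.Dict.getD, PySem.Dict.get?]

-- membership in one fixpoint step of B (generalised over the accumulator)
theorem pvStepB_fold_mem (roots seen : List Int) :
    ∀ (l : List (Int × Int × Int × Int)) (acc : List Int) (x : Int),
      x ∈ List.foldl
            (fun s e => if roots.contains e.1 || seen.contains e.2.1 then PySem.Set.add s e.1 else s)
            acc l
        ↔ x ∈ acc ∨ ∃ p r v, (x, p, r, v) ∈ l ∧ (x ∈ roots ∨ p ∈ seen) := by
  intro l
  induction l with
  | nil => intro acc x; simp
  | cons e t ih =>
    intro acc x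
    obtain ⟨a, b, r0, v0⟩ := e
    simp only [List.foldl_cons]
    by_cases hcond : (roots.contains a || seen.contains b) = true
    · rw [if_pos hcond, ih]
      rw [PySem.Set.mem_add]
      simp only [List.mem_cons, Prod.mk.injEq]
      have hcond' : a ∈ roots ∨ b ∈ seen := by
        simpa [List.contains_eq_mem] using hcond
      constructor
      · rintro ((h | h) | ⟨p, r, v, hm, ho⟩)
        · exact Or.inl h
        · subst h; exact Or.inr ⟨b, r0, v0, Or.inl ⟨rfl, rfl, rfl, rfl⟩, hcond'⟩
        · exact Or.inr ⟨p, r, v, Or.inr hm, ho⟩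
      · rintro (h | ⟨p, r, v, ⟨h1, _, _, _⟩ | hm, ho⟩)
        · exact Or.inl (Or.inl h)
        · exact Or.inl (Or.inr h1)
        · exact Or.inr ⟨p, r, v, hm, ho⟩
    · rw [if_neg hcond, ih]
      simp only [List.mem_cons, Prod.mk.injEq]
      have hcond' : a ∉ roots ∧ b ∉ seen := by
        simpa [List.contains_eq_mem, not_or] using hcond
      constructor
      · rintro (h | ⟨p, r, v, hm, ho⟩)
        · exact Or.inl h
        · exact Or.inr ⟨p, r, v, Or.inr hm, ho⟩
      · rintro (h | ⟨p, r, v, ⟨h1, h2, _, _⟩ | hm, ho⟩)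
        · exact Or.inl h
        · subst h1; subst h2
          rcases ho with h | h
          · exact absurd h hcond'.1
          · exact absurd h hcond'.2
        · exact Or.inr ⟨p, r, v, hm, ho⟩

-- membership in one fixpoint step of B
theorem pvStepB_mem (roots table : List _) (seen : List Int) (x : Int) :
    x ∈ pvStepB roots table seen ↔
      ∃ p r v, (x, p, r, v) ∈ table ∧ (x ∈ roots ∨ p ∈ seen) := by
  unfold pvStepB
  rw [pvStepB_fold_mem]
  simp

-- with nodup keys, the fold of B appends the filtered keys (generalised accumulator)
theorem pvStepB_fold_filter (roots seen : List Int) :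
    ∀ (l : List (Int × Int × Int × Int)) (acc : List Int),
      (pvKeys l).Nodup → (∀ e ∈ l, e.1 ∉ acc) →
      List.foldl
          (fun s e => if roots.contains e.1 || seen.contains e.2.1 then PySem.Set.add s e.1 else s)
          acc l
        = acc ++ (l.filter (fun e => roots.contains e.1 || seen.contains e.2.1)).map (fun e => e.1) := by
  intro l
  induction l with
  | nil => intro acc _ _; simp
  | cons e t ih =>
    intro acc hnd hacc
    have hnd' : (e.1 :: pvKeys t).Nodup := by
      simpa only [pvKeys, List.map_cons] using hnd
    have hnd1 : e.1 ∉ pvKeys t := (List.nodup_cons.mp hnd').1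
    have hnd2 : (pvKeys t).Nodup := (List.nodup_cons.mp hnd').2
    simp only [List.foldl_cons, List.filter_cons]
    by_cases hcond : (roots.contains e.1 || seen.contains e.2.1) = true
    · rw [if_pos hcond, if_pos hcond]
      have hadd : PySem.Set.add acc e.1 = acc ++ [e.1] := by
        simp [PySem.Set.add, hacc e (by simp)]
      rw [hadd, ih (acc ++ [e.1]) hnd2 ?side]
      · simp
      case side =>
        intro e' he'
        simp only [List.mem_append, List.mem_singleton, not_or]
        refine ⟨hacc e' (by simp [he']), fun hq => ?_⟩
        exact hnd1 (by simpa [pvKeys, ← hq] using List.mem_map_of_mem (f := fun e => e.1) he')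
    · rw [if_neg hcond, if_neg hcond]
      exact ih acc hnd2 (fun e' he' => hacc e' (by simp [he']))

-- with nodup keys, one step is the key list filtered by the step predicate
theorem pvStepB_eq_filter (roots table : List _) (seen : List Int)
    (hnd : (pvKeys table).Nodup) :
    pvStepB roots table seen =
      (table.filter (fun e => roots.contains e.1 || seen.contains e.2.1)).map (fun e => e.1) := by
  unfold pvStepB
  rw [pvStepB_fold_filter roots seen table [] hnd (by simp)]
  simp

theorem pvStepB_sublist (roots table : List _) (seen : List Int) (hnd : (pvKeys table).Nodup) :
    (pvStepB roots table seen).Sublist (pvKeys table) := by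
  rw [pvStepB_eq_filter roots table seen hnd]
  exact (List.filter_sublist).map _

-- B's iteration reaches a membership fixpoint within |table| rounds
theorem pvIterB_fix (roots table : List _) (hnd : (pvKeys table).Nodup) :
    ∀ (n : Nat) (seen : List Int),
      (∀ x ∈ seen, x ∈ pvStepB roots table seen) →
      (seen = [] ∨ ∃ s0, (∀ x ∈ s0, x ∈ seen) ∧ seen = pvStepB roots table s0) →
      (pvKeys table).length ≤ seen.length + n →
      (∀ x, x ∈ pvIterB roots table n seen ↔ x ∈ pvStepB roots table (pvIterB roots table n seen))
        ∧ (pvIterB roots table n seen).Sublist (pvKeys table) := by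
  intro n
  induction n with
  | zero =>
    intro seen hInv hF hlen
    have hsub : seen.Sublist (pvKeys table) := by
      rcases hF with rfl | ⟨s0, _, rfl⟩
      · exact List.nil_sublist _
      · exact pvStepB_sublist roots table s0 hnd
    have heq : seen = pvKeys table :=
      hsub.eq_of_length (Nat.le_antisymm hsub.length_le (by omega))
    refine ⟨fun x => ?_, by simpa [pvIterB] using hsub⟩
    simp only [pvIterB]
    constructor
    · exact fun hx => hInv x hx
    · intro hx
      obtain ⟨p, r, v, hm, _⟩ := (pvStepB_mem roots table seen x).mp hx
      rw [heq]
      exact List.mem_map_of_mem (f := fun e => e.1) hm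
  | succ n ih =>
    intro seen hInv hF hlen
    simp only [pvIterB]
    by_cases hstop : pvStepB roots table seen = seen
    · rw [if_pos hstop]
      refine ⟨fun x => by rw [hstop], ?_⟩
      rcases hF with rfl | ⟨s0, _, rfl⟩
      · exact List.nil_sublist _
      · exact pvStepB_sublist roots table s0 hnd
    · rw [if_neg hstop]
      have hInv' : ∀ x ∈ pvStepB roots table seen, x ∈ pvStepB roots table (pvStepB roots table seen) := by
        intro x hx
        obtain ⟨p, r, v, hm, ho⟩ := (pvStepB_mem roots table seen x).mp hx
        refine (pvStepB_mem roots table _ x).mpr ⟨p, r, v, hm, ?_⟩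
        rcases ho with h | h
        · exact Or.inl h
        · exact Or.inr (hInv p h)
      have hsubnw : seen.Sublist (pvStepB roots table seen) := by
        rcases hF with rfl | ⟨s0, hs0, hseq⟩
        · exact List.nil_sublist _
        · conv_lhs => rw [hseq]
          rw [pvStepB_eq_filter roots table s0 hnd, pvStepB_eq_filter roots table seen hnd]
          refine List.Sublist.map _ (List.monotone_filter_right _ ?_)
          intro e he
          simp only [Bool.or_eq_true, List.contains_eq_mem, decide_eq_true_eq] at he ⊢
          rcases he with h | h
          · exact Or.inl h
          · exact Or.inr (hs0 _ h)
      have hlt : seen.length < (pvStepB roots table seen).length :=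
        Nat.lt_of_le_of_ne hsubnw.length_le
          (fun he => hstop (hsubnw.eq_of_length he).symm)
      exact ih (pvStepB roots table seen) hInv'
        (Or.inr ⟨seen, hInv, rfl⟩) (by omega)

-- B's iteration only produces reachable pids
theorem pvIterB_sound (roots table : List _) :
    ∀ (n : Nat) (seen : List Int),
      (∀ x ∈ seen, pvReach roots table x) →
      ∀ x ∈ pvIterB roots table n seen, pvReach roots table x := by
  intro n
  induction n with
  | zero => intro seen h x hx; exact h x (by simpa [pvIterB] using hx)
  | succ n ih =>
    intro seen h x
    simp only [pvIterB]
    split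
    · exact h x
    · refine ih (pvStepB roots table seen) ?_ x
      intro y hy
      obtain ⟨p, r, v, hm, ho⟩ := (pvStepB_mem roots table seen y).mp hy
      rcases ho with hr | hp
      · exact pvReach.root hr (List.mem_map_of_mem (f := fun e => e.1) hm)
      · exact pvReach.child (h p hp) ⟨r, v, hm⟩

-- A's stack loop: invariants in, reachability characterisation out
theorem pvLoopA_spec (roots table : List _) (t : PySem.Dict Int (Int × Int × Int))
    (children : PySem.Dict Int (List Int))
    (hT : ∀ x, t.contains x = true ↔ x ∈ pvKeys table)
    (hC : ∀ x p, x ∈ children.getD p [] ↔ pvEdge table x p) :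
    ∀ (stack seen : List Int),
      (∀ x ∈ seen, pvReach roots table x) →
      (∀ x ∈ seen, x ∈ pvKeys table) →
      seen.Nodup →
      (∀ x ∈ stack, x ∈ roots ∨ ∃ p, p ∈ seen ∧ pvEdge table x p) →
      (∀ p ∈ seen, ∀ c, pvEdge table c p → c ∈ seen ∨ c ∈ stack) →
      (∀ r ∈ roots, r ∈ pvKeys table → r ∈ seen ∨ r ∈ stack) →
      (∀ x ∈ pvLoopA t children stack seen, pvReach roots table x)
        ∧ (pvLoopA t children stack seen).Nodup
        ∧ (∀ p ∈ pvLoopA t children stack seen, ∀ c, pvEdge table c p → c ∈ pvLoopA t children stack seen)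
        ∧ (∀ r ∈ roots, r ∈ pvKeys table → r ∈ pvLoopA t children stack seen) := by
  intro stack seen
  induction stack, seen using pvLoopA.induct t children with
  | case1 seen =>
    intro h1 h2 h3 h4 h5 h6
    rw [pvLoopA]
    refine ⟨h1, h3, ?_, ?_⟩
    · intro p hp c hc
      rcases h5 p hp c hc with h | h
      · exact h
      · cases h
    · intro r hr hk
      rcases h6 r hr hk with h | h
      · exact h
      · cases h
  | case2 stack seen h hseen ih =>
    intro h1 h2 h3 h4 h5 h6
    have hlastseen : stack.getLast h ∈ seen := by simpa using hseen
    rw [pvLoopA, dif_neg h, if_pos hseen]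
    refine ih h1 h2 h3 (fun x hx => h4 x ((List.dropLast_sublist stack).subset hx)) ?_ ?_
    · intro p hp c hc
      rcases h5 p hp c hc with h' | h'
      · exact Or.inl h'
      · rw [← List.dropLast_append_getLast h] at h'
        rcases List.mem_append.mp h' with h'' | h''
        · exact Or.inr h''
        · exact Or.inl (by rwa [List.mem_singleton.mp h''])
    · intro r hr hk
      rcases h6 r hr hk with h' | h'
      · exact Or.inl h'
      · rw [← List.dropLast_append_getLast h] at h'
        rcases List.mem_append.mp h' with h'' | h''
        · exact Or.inr h''
        · exact Or.inl (by rwa [List.mem_singleton.mp h''])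
  | case3 stack seen h hseen ht ih =>
    intro h1 h2 h3 h4 h5 h6
    have hnotkey : stack.getLast h ∉ pvKeys table := fun hk => by
      have := (hT _).mpr hk
      rw [ht] at this
      cases this
    rw [pvLoopA, dif_neg h, if_neg hseen, dif_pos ht]
    refine ih h1 h2 h3 (fun x hx => h4 x ((List.dropLast_sublist stack).subset hx)) ?_ ?_
    · intro p hp c hc
      rcases h5 p hp c hc with h' | h'
      · exact Or.inl h'
      · rw [← List.dropLast_append_getLast h] at h'
        rcases List.mem_append.mp h' with h'' | h''
        · exact Or.inr h''
        · exfalso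
          obtain ⟨r, v, hm⟩ := hc
          exact hnotkey (by
            rw [← List.mem_singleton.mp h'']
            exact List.mem_map_of_mem (f := fun e => e.1) hm)
    · intro r hr hk
      rcases h6 r hr hk with h' | h'
      · exact Or.inl h'
      · rw [← List.dropLast_append_getLast h] at h'
        rcases List.mem_append.mp h' with h'' | h''
        · exact Or.inr h''
        · rw [List.mem_singleton.mp h''] at hk
          exact absurd hk hnotkey
  | case4 stack seen h hseen ht ih =>
    intro h1 h2 h3 h4 h5 h6
    have hkey : stack.getLast h ∈ pvKeys table := (hT _).mp (by simpa using ht)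
    have hnotseen : stack.getLast h ∉ seen := by simpa using hseen
    have hreach : pvReach roots table (stack.getLast h) := by
      rcases h4 _ (List.getLast_mem h) with hr | ⟨p, hp, he⟩
      · exact pvReach.root hr hkey
      · exact pvReach.child (h1 p hp) he
    have hadd : PySem.Set.add seen (stack.getLast h) = seen ++ [stack.getLast h] := by
      simp [PySem.Set.add, hnotseen]
    rw [pvLoopA, dif_neg h, if_neg hseen, dif_neg ht]
    refine ih ?_ ?_ ?_ ?_ ?_ ?_
    · intro x hx
      rw [hadd] at hx
      rcases List.mem_append.mp hx with h' | h'
      · exact h1 x h'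
      · rwa [List.mem_singleton.mp h']
    · intro x hx
      rw [hadd] at hx
      rcases List.mem_append.mp hx with h' | h'
      · exact h2 x h'
      · rwa [List.mem_singleton.mp h']
    · rw [hadd]
      simp only [List.nodup_append, List.nodup_singleton, true_and]
      refine ⟨h3, ?_⟩
      intro a ha b hb hab
      rw [List.mem_singleton.mp hb] at hab
      exact hnotseen (hab ▸ ha)
    · intro x hx
      rcases List.mem_append.mp hx with h' | h'
      · rcases h4 x ((List.dropLast_sublist stack).subset h') with hr | ⟨p, hp, he⟩
        · exact Or.inl hr
        · exact Or.inr ⟨p, by rw [hadd]; exact ⟨List.mem_append.mpr (Or.inl hp), he⟩⟩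
      · refine Or.inr ⟨stack.getLast h, ?_, (hC x _).mp h'⟩
        rw [hadd]
        exact List.mem_append.mpr (Or.inr (List.mem_singleton.mpr rfl))
    · intro p hp c hc
      rw [hadd] at hp
      rcases List.mem_append.mp hp with h' | h'
      · rcases h5 p h' c hc with h'' | h''
        · exact Or.inl (by rw [hadd]; exact List.mem_append.mpr (Or.inl h''))
        · rw [← List.dropLast_append_getLast h] at h''
          rcases List.mem_append.mp h'' with h3' | h3'
          · exact Or.inr (List.mem_append.mpr (Or.inl h3'))
          · refine Or.inl ?_
            rw [hadd]
            exact List.mem_append.mpr (Or.inr h3')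
      · have hpl : p = stack.getLast h := List.mem_singleton.mp h'
        subst hpl
        exact Or.inr (List.mem_append.mpr (Or.inr ((hC c _).mpr hc)))
    · intro r hr hk
      rcases h6 r hr hk with h' | h'
      · exact Or.inl (by rw [hadd]; exact List.mem_append.mpr (Or.inl h'))
      · rw [← List.dropLast_append_getLast h] at h'
        rcases List.mem_append.mp h' with h'' | h''
        · exact Or.inr (List.mem_append.mpr (Or.inl h''))
        · exact Or.inl (by rw [hadd]; exact List.mem_append.mpr (Or.inr h''))

-- ===== VERDICT (by name: the statement is the Claim_ definition above) =====
theorem collect_tree_spec : Claim_equal_collect_tree := by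
  intro root_pids table _ hpre
  unfold Spec_collect_tree
  simp only [collect_tree, collect_tree_alt]
  have hnd : (pvKeys table).Nodup := hpre
  have hrsiff : ∀ x : Int,
      x ∈ PySem.Set.ofList (root_pids.filter (fun p => decide (0 < p)))
        ↔ x ∈ root_pids.filter (fun p => decide (0 < p)) := by
    intro x; exact PySem.Set.mem_ofList _ _
  have hT : ∀ x, (PySem.Dict.mk table).contains x = true ↔ x ∈ pvKeys table := by
    intro x
    simp [PySem.Dict.contains_mk, List.any_eq_true, pvKeys, List.mem_map, beq_iff_eq]
  obtain ⟨hA1, hA2, hA3, hA4⟩ :=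
    pvLoopA_spec (PySem.Set.ofList (root_pids.filter (fun p => decide (0 < p)))) table
      (PySem.Dict.mk table) (pvChildren table) hT (pvChildren_mem table)
      (root_pids.filter (fun p => decide (0 < p))) []
      (by simp) (by simp) List.nodup_nil
      (fun x hx => Or.inl ((hrsiff x).mpr hx))
      (by simp)
      (fun r hr _ => Or.inr ((hrsiff r).mp hr))
  obtain ⟨hFfix, hFsub⟩ :=
    pvIterB_fix (PySem.Set.ofList (root_pids.filter (fun p => decide (0 < p)))) table hnd
      table.length [] (by simp) (Or.inl rfl) (by simp [pvKeys])
  have hFnd := hnd.sublist hFsub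
  have hFsound :=
    pvIterB_sound (PySem.Set.ofList (root_pids.filter (fun p => decide (0 < p)))) table
      table.length [] (by simp)
  have hReachF : ∀ x,
      pvReach (PySem.Set.ofList (root_pids.filter (fun p => decide (0 < p)))) table x →
      x ∈ pvIterB (PySem.Set.ofList (root_pids.filter (fun p => decide (0 < p)))) table
            table.length [] := by
    refine pvReach_min _ table _ ?_ ?_
    · intro r hr hk
      refine (hFfix r).mpr ((pvStepB_mem _ table _ r).mpr ?_)
      obtain ⟨e, he, hfst⟩ := List.mem_map.mp hk
      refine ⟨e.2.1, e.2.2.1, e.2.2.2, ?_, Or.inl hr⟩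
      rw [← hfst]
      exact he
    · intro p hp c he
      obtain ⟨r, v, hm⟩ := he
      exact (hFfix c).mpr ((pvStepB_mem _ table _ c).mpr ⟨p, r, v, hm, Or.inr hp⟩)
  have hReachR :=
    pvReach_min (PySem.Set.ofList (root_pids.filter (fun p => decide (0 < p)))) table
      (· ∈ pvLoopA (PySem.Dict.mk table) (pvChildren table)
            (root_pids.filter (fun p => decide (0 < p))) [])
      hA4 (fun p hp c he => hA3 p hp c he)
  have hiff : ∀ a : Int,
      a ∈ pvLoopA (PySem.Dict.mk table) (pvChildren table)
            (root_pids.filter (fun p => decide (0 < p))) []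
        ↔ a ∈ pvIterB (PySem.Set.ofList (root_pids.filter (fun p => decide (0 < p)))) table
            table.length [] :=
    fun a => ⟨fun h => hReachF a (hA1 a h), fun h => hReachR a (hFsound a h)⟩
  have hperm := (List.perm_ext_iff_of_nodup hA2 hFnd).mpr hiff
  rw [(hperm.map (fun p => ((PySem.Dict.mk table).getD p (0, 0, 0)).2.1)).sum_eq,
      (hperm.map (fun p => ((PySem.Dict.mk table).getD p (0, 0, 0)).2.2)).sum_eq,
      PySem.List.sorted_eq_sorted_of_perm _ _ (fun x => x) (fun _ _ hab => hab) hperm]
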